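-- pv_equiv track=rewrite | github.com/Yeseo0502/CodingTest | 프로그래머스/0/120886. A로 B 만들기/A로 B 만들기.py | solution
-- ===== SOURCE A (Python) =====
-- def solution(before, after):
--     answer = 1
--     hiLen = list(after)
--     for i in before :
--         if i in hiLen :
--             hiLen.remove(i)
--     if len(hiLen)>0 :
--         answer = 0
--     return answer
-- ===== SOURCE B (Python) =====
-- def solution(before, after):
--     return 1 if all(after.count(c) <= before.count(c) for c in set(after)) else 0
-- ===== Notes on version B (the rewrite author's own statement) =====
-- stated objective: faster
-- what changed: Replaced the destructive scan-and-remove loop over a working copy of after with a direct multiset-inclusion test: for each distinct character of after, compare its count in after with its count in before.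
import Mathlib
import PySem

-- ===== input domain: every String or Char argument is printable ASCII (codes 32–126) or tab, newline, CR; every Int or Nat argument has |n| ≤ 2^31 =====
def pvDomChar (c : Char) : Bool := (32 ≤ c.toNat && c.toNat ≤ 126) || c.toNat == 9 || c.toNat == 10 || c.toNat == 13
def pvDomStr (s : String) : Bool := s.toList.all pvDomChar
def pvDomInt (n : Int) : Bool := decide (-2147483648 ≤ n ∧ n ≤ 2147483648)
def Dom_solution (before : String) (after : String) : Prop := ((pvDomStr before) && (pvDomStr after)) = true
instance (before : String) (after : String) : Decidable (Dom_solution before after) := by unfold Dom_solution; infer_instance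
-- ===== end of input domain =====

-- B replaces A's destructive scan-and-remove over a copy of `after` with a direct
-- per-character count comparison (multiset inclusion); same return value everywhere.
-- ===== PORT A =====
def solution (before : String) (after : String) : Int :=
  let hiLen := after.toList
  let hiLen := before.toList.foldl
    (fun h i => if h.contains i then (PySem.List.remove? h i).getD h else h) hiLen
  let answer : Int := if hiLen.length > 0 then 0 else 1
  answer

-- ===== PORT B =====
def solution_alt (before : String) (after : String) : Int :=
  if (PySem.Set.ofList after.toList).all
      (fun c => after.toList.count c ≤ before.toList.count c) then 1 else 0

-- ===== PRECONDITION & SPEC =====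
def Spec_solution (before : String) (after : String) (out : Int) : Prop := out = solution_alt before after
instance (before : String) (after : String) (out : Int) : Decidable (Spec_solution before after out) := by unfold Spec_solution; infer_instance

-- ===== CLAIM (what is proved, stated in full; the proofs are below) =====
def Claim_equal_solution : Prop := ∀ (before : String) (after : String), Dom_solution before after → Spec_solution before after (solution before after)

-- ===== LEMMAS AND PROOFS =====

-- ===== VERDICT (by name: the statement is the Claim_ definition above) =====
-- Invariant of A's loop: after folding the removal step over bs, the count of any
-- character c in the working list is its original count minus bs.count c (Nat sub).
theorem count_fold (bs : List Char) (h : List Char) (c : Char) :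
    (bs.foldl (fun h i => if h.contains i then (PySem.List.remove? h i).getD h else h) h).count c
      = h.count c - bs.count c := by
  induction bs generalizing h with
  | nil => simp
  | cons b bs ih =>
    simp only [List.foldl_cons, List.count_cons]
    rw [ih]
    by_cases hb : b ∈ h
    · rw [if_pos (by simpa using hb), PySem.List.remove?_eq_some_erase h b hb]
      simp only [Option.getD_some, List.count_erase]
      rcases eq_or_ne b c with rfl | hne
      · simp; omega
      · simp [hne]
    · rw [if_neg (by simpa using hb)]
      rcases eq_or_ne b c with rfl | hne
      · have : h.count b = 0 := List.count_eq_zero.mpr hb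
        simp [this]
      · simp [hne]

theorem solution_spec : Claim_equal_solution := by
  intro before after _
  unfold Spec_solution solution solution_alt
  simp only []
  set step := fun (h : List Char) (i : Char) =>
    if h.contains i then (PySem.List.remove? h i).getD h else h with hstep
  set r := before.toList.foldl step after.toList with hr
  have hcount : ∀ c, r.count c = after.toList.count c - before.toList.count c := by
    intro c; exact count_fold before.toList after.toList c
  have key : (r.length > 0) ↔
      ¬ (PySem.Set.ofList after.toList).all
        (fun c => after.toList.count c ≤ before.toList.count c) = true := by
    constructor
    · intro hlen hall
      obtain ⟨x, xs, hx⟩ := List.exists_cons_of_ne_nil (List.ne_nil_of_length_pos hlen)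
      have hxr : r.count x ≥ 1 := by rw [hx]; simp
      have h1 := hcount x
      have hmem : x ∈ after.toList := by
        have : after.toList.count x ≥ 1 := by omega
        exact List.count_pos_iff.mp (by omega)
      have := List.all_eq_true.mp hall x ((PySem.Set.mem_ofList _ _).mpr hmem)
      simp only [decide_eq_true_eq] at this
      omega
    · intro hnall
      by_contra hlen
      apply hnall
      refine List.all_eq_true.mpr (fun c hc => ?_)
      have h1 := hcount c
      have : r.count c = 0 := by
        have : r = [] := List.eq_nil_of_length_eq_zero (by omega)
        simp [this]
      simp only [decide_eq_true_eq]
      have hmem : c ∈ after.toList := (PySem.Set.mem_ofList _ _).mp hc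
      have : after.toList.count c ≥ 1 := List.count_pos_iff.mpr hmem
      omega
  by_cases hgt : r.length > 0
  · rw [if_pos hgt, if_neg (by simpa using key.mp hgt)]
  · rw [if_neg hgt]
    rw [if_pos (by by_contra hn; exact hgt (key.mpr (by simpa using hn)))]
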